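-- pv_equiv track=rewrite | github.com/thomasverrecchia/TP_Probleme_SAT | DPLL.py | literalpur
-- ===== SOURCE A (Python) =====
-- def maxliteral(C):
--     # retour le litéral max(ca valeur non)( renvoie toujour un impaire)
--     sup = 0
--     for c in C:
--         if max(c) > sup:
--             sup = max(c)
--     if sup % 2 == 0:
--         return sup + 1
--     else:
--         return sup
--
-- def literalpur(C):
--     # renvoie si il existe, un litéral pur de l'ensemble de clause, None sinon
--     for l in range(maxliteral(C) + 1):
--         litpur = False
--         for c in C:
--             if l in c:
--                 litpur = True
--                 break
--         if l % 2 == 0 and litpur: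
--             for c in C:
--                 if l + 1 in c:
--                     litpur = False
--         if l % 2 == 1 and litpur:
--             for c in C:
--                 if l - 1 in c:
--                     litpur = False
--         if litpur:
--             return l
-- ===== SOURCE B (Python) =====
-- def literalpur(C):
--     # Union of all literals, then min over present non-negative literals whose partner is absent.
--     S = set()
--     for c in C:
--         S.update(c)
--     return min((l for l in S if l >= 0 and (l + 1 if l % 2 == 0 else l - 1) not in S),
--                default=None)
-- ===== Notes on version B (the rewrite author's own statement) =====
-- stated objective: faster
-- what changed: Replaces A's scan of range(0, maxliteral+1) with three nested membership passes over C by one union of all literals into a set followed by a min over the present non-negative literals whose complement is absent.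
import Mathlib
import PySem

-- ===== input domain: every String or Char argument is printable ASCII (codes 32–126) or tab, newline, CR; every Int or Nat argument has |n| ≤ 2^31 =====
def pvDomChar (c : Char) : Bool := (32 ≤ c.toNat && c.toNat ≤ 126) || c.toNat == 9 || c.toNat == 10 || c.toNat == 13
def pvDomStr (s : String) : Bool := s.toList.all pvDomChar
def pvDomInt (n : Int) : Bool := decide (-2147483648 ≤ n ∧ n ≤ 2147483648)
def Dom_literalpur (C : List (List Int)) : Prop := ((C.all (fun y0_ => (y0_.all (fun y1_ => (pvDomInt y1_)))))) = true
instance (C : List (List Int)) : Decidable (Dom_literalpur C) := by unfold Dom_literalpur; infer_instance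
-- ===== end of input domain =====

-- B replaces A's scan of range(0, maxliteral+1) with nested membership passes by one set union
-- of all literals and a min over the present non-negative literals whose partner is absent (faster: no dependence on the literals' magnitude).

-- ===== PORT A =====
-- max(c) raises ValueError on an empty clause; Pre_literalpur excludes clauses [], so the
-- total form '(max? c).getD 0' is exact on every admitted input.
def maxliteral (C : List (List Int)) : Int :=
  let sup := C.foldl (fun sup c =>
    if (PySem.List.max? c (fun x => x)).getD 0 > sup
    then (PySem.List.max? c (fun x => x)).getD 0 else sup) 0
  if PySem.Int.mod sup 2 == 0 then sup + 1 else sup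

def literalpurCheck (C : List (List Int)) (l : Int) : Bool :=
  let litpur := C.any (fun c => c.contains l)
  let litpur := if PySem.Int.mod l 2 == 0 && litpur then
                  C.foldl (fun b c => if c.contains (l + 1) then false else b) litpur
                else litpur
  let litpur := if PySem.Int.mod l 2 == 1 && litpur then
                  C.foldl (fun b c => if c.contains (l - 1) then false else b) litpur
                else litpur
  litpur

-- 'for l in range(maxliteral(C) + 1)' scanned lazily, as Python's range is: the remaining
-- iteration count is the structural fuel, the current l the loop variable.
def literalpurLoop (C : List (List Int)) : Nat → Int → Option Int
  | 0, _ => none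
  | n + 1, l => if literalpurCheck C l then some l else literalpurLoop C n (l + 1)

def literalpur (C : List (List Int)) : Option Int :=
  literalpurLoop C (maxliteral C + 1).toNat 0

-- ===== PORT B =====
def literalpur_alt (C : List (List Int)) : Option Int :=
  let S : PySem.Set Int := C.foldl (fun s c => PySem.Set.update s c) PySem.Set.empty
  PySem.List.min?
    (S.filter (fun l =>
      decide (0 ≤ l) && !(PySem.Set.contains S (if PySem.Int.mod l 2 == 0 then l + 1 else l - 1))))
    (fun x => x)

-- ===== PRECONDITION & SPEC =====
-- Pre_ excludes clause sets containing an empty clause, on which A's 'max(c)' raises ValueError.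
def Pre_literalpur (C : List (List Int)) : Prop := ∀ c ∈ C, c ≠ []
instance (C : List (List Int)) : Decidable (Pre_literalpur C) := by unfold Pre_literalpur; infer_instance
def pvWitness_literalpur : List (List Int) := [[2, 5], [3]]

def Spec_literalpur (C : List (List Int)) (out : Option Int) : Prop := out = literalpur_alt C
instance (C : List (List Int)) (out : Option Int) : Decidable (Spec_literalpur C out) := by unfold Spec_literalpur; infer_instance

-- ===== CLAIM (what is proved, stated in full; the proofs are below) =====
def Claim_equal_literalpur : Prop := ∀ (C : List (List Int)), Dom_literalpur C → Pre_literalpur C → Spec_literalpur C (literalpur C)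

-- ===== LEMMAS AND PROOFS =====

-- 'l present in some clause of C'
def pvPresent (C : List (List Int)) (l : Int) : Bool := C.any (fun c => c.contains l)

def pvPartner (l : Int) : Int := if PySem.Int.mod l 2 == 0 then l + 1 else l - 1

def pvGood (C : List (List Int)) (l : Int) : Bool := pvPresent C l && !pvPresent C (pvPartner l)

theorem pv_foldl_false (C : List (List Int)) (p : List Int → Bool) (b : Bool) :
    C.foldl (fun b c => if p c then false else b) b = (b && !(C.any p)) := by
  induction C generalizing b with
  | nil => simp
  | cons c t ih =>
      simp only [List.foldl_cons, List.any_cons, ih]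
      by_cases h : p c = true <;> simp [h]

theorem pv_check_eq_good (C : List (List Int)) (l : Int) :
    literalpurCheck C l = pvGood C l := by
  have hm : PySem.Int.mod l 2 = l % 2 := PySem.Int.mod_eq_emod_of_pos (by omega)
  have h2 : l % 2 = 0 ∨ l % 2 = 1 := Int.emod_two_eq_zero_or_one l
  unfold literalpurCheck pvGood pvPartner pvPresent
  rcases h2 with h | h <;>
    simp only [hm, h, pv_foldl_false] <;>
    cases hp : C.any (fun c => c.contains l) <;> simp

-- membership in the union set built by port B
theorem pv_mem_update (s : PySem.Set Int) (c : List Int) (l : Int) :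
    l ∈ PySem.Set.update s c ↔ l ∈ s ∨ l ∈ c := by
  induction c generalizing s with
  | nil => simp [PySem.Set.update]
  | cons x t ih =>
      simp only [PySem.Set.update, List.foldl_cons] at *
      rw [ih (s.add x), PySem.Set.mem_add]
      simp [or_assoc, or_comm, or_left_comm]

theorem pv_mem_S (C : List (List Int)) (l : Int) :
    l ∈ C.foldl (fun s c => PySem.Set.update s c) PySem.Set.empty ↔ pvPresent C l = true := by
  have key : ∀ (s : PySem.Set Int),
      l ∈ C.foldl (fun s c => PySem.Set.update s c) s ↔ l ∈ s ∨ pvPresent C l = true := by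
    induction C with
    | nil => intro s; simp [pvPresent]
    | cons c t ih =>
        intro s
        simp only [List.foldl_cons, ih, pv_mem_update, pvPresent, List.any_cons]
        simp [or_assoc]
  rw [key PySem.Set.empty]
  simp [PySem.Set.empty]

-- sup bound: every literal present in C is ≤ maxliteral C, and 0 ≤ maxliteral C
theorem pv_foldl_sup (C : List (List Int)) (acc : Int) :
    acc ≤ C.foldl (fun sup c =>
      if (PySem.List.max? c (fun x => x)).getD 0 > sup
      then (PySem.List.max? c (fun x => x)).getD 0 else sup) acc ∧
    ∀ c ∈ C, (PySem.List.max? c (fun x => x)).getD 0 ≤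
      C.foldl (fun sup c =>
        if (PySem.List.max? c (fun x => x)).getD 0 > sup
        then (PySem.List.max? c (fun x => x)).getD 0 else sup) acc := by
  induction C generalizing acc with
  | nil => simp
  | cons c t ih =>
      simp only [List.foldl_cons, List.mem_cons]
      constructor
      · by_cases h : (PySem.List.max? c (fun x => x)).getD 0 > acc <;> simp only [h, if_pos]
        · exact le_trans (le_of_lt h) (ih _).1
        · exact (ih _).1
      · intro d hd
        rcases hd with rfl | hd
        · by_cases h : (PySem.List.max? d (fun x => x)).getD 0 > acc
          · simp only [h, if_pos]; exact (ih _).1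
          · simp only [h, if_neg, not_false_iff]
            exact le_trans (le_of_not_gt h) (ih _).1
        · exact (ih _).2 d hd

theorem pv_present_le_maxliteral (C : List (List Int)) (l : Int)
    (hp : pvPresent C l = true) : l ≤ maxliteral C := by
  unfold pvPresent at hp
  simp only [List.any_eq_true, List.contains_iff_mem] at hp
  obtain ⟨c, hc, hl⟩ := hp
  obtain ⟨mx, hmx⟩ : ∃ mx, PySem.List.max? c (fun x => x) = some mx := by
    cases h : PySem.List.max? c (fun x => x) with
    | none => rw [PySem.List.max?_eq_none_iff] at h; subst h; simp at hl
    | some mx => exact ⟨mx, rfl⟩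
  have h1 : l ≤ mx := PySem.List.max?_isMax hmx l hl
  have h2 : mx ≤ C.foldl (fun sup c =>
      if (PySem.List.max? c (fun x => x)).getD 0 > sup
      then (PySem.List.max? c (fun x => x)).getD 0 else sup) 0 := by
    have := (pv_foldl_sup C 0).2 c hc
    rwa [hmx, Option.getD_some] at this
  unfold maxliteral
  by_cases h : PySem.Int.mod (C.foldl (fun sup c =>
      if (PySem.List.max? c (fun x => x)).getD 0 > sup
      then (PySem.List.max? c (fun x => x)).getD 0 else sup) 0) 2 == 0 <;>
    simp only [h, if_pos, if_neg, Bool.not_eq_true] <;> omega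

-- the scan loop: no satisfying element → none
theorem pv_loop_none (C : List (List Int)) :
    ∀ (n : Nat) (a : Int), (∀ k, a ≤ k → k < a + n → literalpurCheck C k = false) →
    literalpurLoop C n a = none := by
  intro n
  induction n with
  | zero => intro a _; rfl
  | succ n ih =>
      intro a h
      simp only [literalpurLoop, h a le_rfl (by omega)]
      exact ih (a + 1) (fun k hk1 hk2 => h k (by omega) (by push_cast at hk2 ⊢; omega))

-- the scan loop: m the first satisfying element from a on → some m
theorem pv_loop_some (C : List (List Int)) (m : Int)
    (hm : literalpurCheck C m = true) :
    ∀ (n : Nat) (a : Int), a ≤ m → m < a + n →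
    (∀ k, a ≤ k → k < m → literalpurCheck C k = false) →
    literalpurLoop C n a = some m := by
  intro n
  induction n with
  | zero => intro a ha hb _; simp at hb; omega
  | succ n ih =>
      intro a ha hb hfirst
      by_cases ham : a = m
      · subst ham; simp [literalpurLoop, hm]
      · simp only [literalpurLoop, hfirst a le_rfl (by omega)]
        exact ih (a + 1) (by omega) (by push_cast at hb ⊢; omega)
          (fun k hk1 hk2 => hfirst k (by omega) hk2)

theorem pv_maxliteral_nonneg (C : List (List Int)) : 0 ≤ maxliteral C := by
  have h := (pv_foldl_sup C 0).1
  unfold maxliteral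
  by_cases hb : PySem.Int.mod (C.foldl (fun sup c =>
      if (PySem.List.max? c (fun x => x)).getD 0 > sup
      then (PySem.List.max? c (fun x => x)).getD 0 else sup) 0) 2 == 0 <;>
    simp only [hb, if_pos] <;> omega

-- ===== VERDICT (by name: the statement is the Claim_ definition above) =====
theorem literalpur_spec : Claim_equal_literalpur := by
  intro C _ _
  unfold Spec_literalpur literalpur literalpur_alt
  set S := C.foldl (fun s c => PySem.Set.update s c) PySem.Set.empty with hS
  set p : Int → Bool := fun l =>
    decide (0 ≤ l) && !(PySem.Set.contains S (if PySem.Int.mod l 2 == 0 then l + 1 else l - 1)) with hp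
  have hcontains : ∀ l, PySem.Set.contains S l = pvPresent C l := by
    intro l
    cases h : pvPresent C l with
    | true =>
        have : l ∈ S := (pv_mem_S C l).2 h
        simpa [PySem.Set.contains, List.contains_iff_mem] using this
    | false =>
        have : ¬ l ∈ S := fun hmem => by simp [(pv_mem_S C l).1 hmem] at h
        simpa [PySem.Set.contains, List.contains_iff_mem] using this
  have hpgood : ∀ l, l ∈ S → (p l = true ↔ (0 ≤ l ∧ pvGood C l = true)) := by
    intro l hl
    have hlp : pvPresent C l = true := (pv_mem_S C l).1 hl
    have hpart : (if PySem.Int.mod l 2 == 0 then l + 1 else l - 1) = pvPartner l := rfl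
    rw [hp]
    simp only [hpart, hcontains, pvGood, hlp]
    simp
  cases hmin : PySem.List.min? (S.filter p) (fun x => x) with
  | none =>
      rw [PySem.List.min?_eq_none_iff] at hmin
      have hnone : ∀ k, 0 ≤ k → pvGood C k = false := by
        intro k hk
        by_contra h
        have hg : pvGood C k = true := by revert h; cases pvGood C k <;> simp
        have hkpres : pvPresent C k = true := by
          simp only [pvGood, Bool.and_eq_true] at hg; exact hg.1
        have hkS : k ∈ S := (pv_mem_S C k).2 hkpres
        have : k ∈ S.filter p := List.mem_filter.2 ⟨hkS, (hpgood k hkS).2 ⟨hk, hg⟩⟩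
        rw [hmin] at this; simp at this
      refine pv_loop_none C ((maxliteral C + 1).toNat) 0 ?_
      intro k hk _
      rw [pv_check_eq_good]
      exact hnone k hk
  | some m =>
      have hmF := PySem.List.min?_mem hmin
      obtain ⟨hmS, hpm⟩ := List.mem_filter.1 hmF
      obtain ⟨hm0, hmg⟩ := (hpgood m hmS).1 hpm
      have hfirst : ∀ k, 0 ≤ k → k < m → literalpurCheck C k = false := by
        intro k hk0 hkm
        rw [pv_check_eq_good]
        by_contra h
        have hg : pvGood C k = true := by revert h; cases pvGood C k <;> simp
        have hkpres : pvPresent C k = true := by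
          simp only [pvGood, Bool.and_eq_true] at hg; exact hg.1
        have hkS : k ∈ S := (pv_mem_S C k).2 hkpres
        have hkF : k ∈ S.filter p := List.mem_filter.2 ⟨hkS, (hpgood k hkS).2 ⟨hk0, hg⟩⟩
        have := PySem.List.min?_isMin hmin k hkF
        simp only at this
        omega
      have hmb : m < maxliteral C + 1 := by
        have hmpres : pvPresent C m = true := by
          simp only [pvGood, Bool.and_eq_true] at hmg; exact hmg.1
        have := pv_present_le_maxliteral C m hmpres
        omega
      have hM := pv_maxliteral_nonneg C
      exact pv_loop_some C m (by rw [pv_check_eq_good]; exact hmg)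
        ((maxliteral C + 1).toNat) 0 hm0 (by omega) hfirst
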